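-- pv_equiv track=rewrite | github.com/mirelois/mirelois-LA2 | treino2/erdos.py | erdos
-- ===== SOURCE A (Python) =====
-- def bfs(adj,o):
--     dist = {o: 0}
--     vis = {o}
--     queue = [o]
--     while queue:
--         v = queue.pop(0)
--         for d in adj[v]:
--             if d not in vis:
--                 dist[d] = dist[v] + 1
--                 vis.add(d)
--                 queue.append(d)
--     return dist
--
-- def erdos(artigos, n):
--     grafo = {"Paul Erdos" : set()}
--     for artigo in artigos:
--         for autor in artigos[artigo]:
--             if autor not in grafo:
--                 grafo[autor] = set()
--             grafo[autor] |= artigos[artigo]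
--             grafo[autor].remove(autor)
--
--     erdos = bfs(grafo, "Paul Erdos")
--
--     return sorted(list(filter(lambda a: erdos[a] <= n, erdos.keys())), key=lambda a: (erdos[a], a))
-- ===== SOURCE B (Python) =====
-- def erdos(artigos, n):
--     # Hypergraph BFS over the articles themselves: an article whose author set
--     # touches the reached set puts all its authors one level further out.
--     # The co-author adjacency graph is never built.
--     dist = {"Paul Erdos": 0}
--     pending = list(artigos.values())
--     level = 0
--     while True:
--         hit = [s for s in pending if any(a in dist for a in s)]
--         if not hit:
--             break
--         pending = [s for s in pending if not any(a in dist for a in s)]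
--         level += 1
--         for s in hit:
--             for a in s:
--                 dist.setdefault(a, level)
--     return sorted((a for a in dist if dist[a] <= n), key=lambda a: (dist[a], a))
-- ===== Notes on version B (the rewrite author's own statement) =====
-- stated objective: faster
-- what changed: B never builds A's co-author adjacency graph or runs a vertex-by-vertex queue BFS at all: it does a hypergraph BFS directly over the articles (each round, every remaining article whose author set touches the reached set is consumed and all its authors get the next level via setdefault), then filters and sorts; this is correct because authors are adjacent in A's graph exactly when they share an article, so an article acts as a clique reached as soon as one of its authors is. Pre_ excludes association lists with duplicate keys, which the dict[str, set[str]] argument cannot represent.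
import Mathlib
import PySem

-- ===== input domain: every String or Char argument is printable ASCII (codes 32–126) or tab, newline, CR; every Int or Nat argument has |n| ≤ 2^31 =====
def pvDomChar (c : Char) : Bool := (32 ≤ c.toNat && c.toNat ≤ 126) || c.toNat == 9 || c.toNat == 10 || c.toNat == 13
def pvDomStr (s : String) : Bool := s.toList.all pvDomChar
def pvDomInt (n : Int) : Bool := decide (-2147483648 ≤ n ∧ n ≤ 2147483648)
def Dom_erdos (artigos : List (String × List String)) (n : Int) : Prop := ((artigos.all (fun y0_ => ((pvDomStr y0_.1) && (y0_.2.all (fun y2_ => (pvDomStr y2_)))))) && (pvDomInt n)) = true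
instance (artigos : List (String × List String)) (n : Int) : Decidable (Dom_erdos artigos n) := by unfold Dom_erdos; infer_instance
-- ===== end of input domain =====

-- B never builds A's co-author adjacency graph at all: it runs a hypergraph BFS directly
-- over the articles (any not-yet-consumed article touching the reached set contributes all
-- its authors at the next level), then filters and sorts; objective: faster (no quadratic
-- per-author set unions, no list-queue pop(0)), same exact return value.  `artigos` is a Python dict[str, set[str]]: the association list
-- stands for that dict (unique keys, see Pre_), each value list for the value set.

-- ===== PORT A =====

-- while queue: v = queue.pop(0); for d in adj[v]: if d not in vis: dist[d]=dist[v]+1; vis.add(d); queue.append(d)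
-- The while loop is run on `fuel`; the caller passes a provably sufficient amount (each
-- iteration pops one queue entry; entries are the start node plus distinct discovered
-- nodes, all drawn from the adjacency lists).  `adj[v]` and `dist[v]` cannot raise
-- (v is always a key of both), so `getD` with a default is exact there.
def bfsALoop (adj : PySem.Dict String (PySem.Set String)) :
    Nat → PySem.Dict String Int → PySem.Set String → List String → PySem.Dict String Int
  | _, dist, _, [] => dist
  | 0, dist, _, _ => dist
  | fuel+1, dist, vis, v :: queue =>
      let st := (adj.getD v PySem.Set.empty).foldl
        (fun (st : PySem.Dict String Int × PySem.Set String × List String) d =>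
          if PySem.Set.contains st.2.1 d then st
          else (st.1.insert d (st.1.getD v 0 + 1), PySem.Set.add st.2.1 d, st.2.2 ++ [d]))
        (dist, vis, queue)
      bfsALoop adj fuel st.1 st.2.1 st.2.2

-- dist = {o: 0}; vis = {o}; queue = [o]; while queue: …; return dist
def bfsA (adj : PySem.Dict String (PySem.Set String)) (o : String) : PySem.Dict String Int :=
  bfsALoop adj ((PySem.List.dedup adj.values.flatten).length + 1)
    (PySem.Dict.mk [(o, 0)]) (PySem.Set.add PySem.Set.empty o) [o]

def erdos (artigos : List (String × List String)) (n : Int) : List String :=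
  -- grafo = {"Paul Erdos": set()}; for artigo in artigos: for autor in artigos[artigo]: …
  -- (iteration over the dict's items; under Pre_ (unique keys) artigos[artigo] is the pair's value)
  let grafo : PySem.Dict String (PySem.Set String) :=
    artigos.foldl (fun grafo art =>
      art.2.foldl (fun grafo autor =>
        -- if autor not in grafo: grafo[autor] = set()
        let grafo := if grafo.contains autor then grafo else grafo.insert autor PySem.Set.empty
        -- grafo[autor] |= artigos[artigo]; grafo[autor].remove(autor)
        -- (autor was just added by the union, so KeyError is impossible: remove = discard)
        grafo.insert autor
          (PySem.Set.discard (PySem.Set.union (grafo.getD autor PySem.Set.empty) art.2) autor))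
        grafo)
      (PySem.Dict.mk [("Paul Erdos", PySem.Set.empty)])
  let dist := bfsA grafo "Paul Erdos"
  -- sorted(filter(lambda a: dist[a] <= n, dist.keys()), key=lambda a: (dist[a], a))
  -- (a is always a key of dist, so dist[a] cannot raise and getD is exact)
  PySem.List.sorted2 (dist.keys.filter (fun a => decide (dist.getD a 0 ≤ n)))
    (fun a => dist.getD a 0) (fun a => a) false

-- ===== PORT B =====

-- while True: hit = [s for s in pending if any(a in dist for a in s)]; if not hit: break;
--             pending = [s for s in pending if not any(a in dist for a in s)]; level += 1;
--             for s in hit: for a in s: dist.setdefault(a, level)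
-- Run on `fuel`; the caller passes len(artigos)+1, which is sufficient (every iteration
-- that does not break removes at least one article from `pending`).
def artLoop : Nat → PySem.Dict String Int → List (List String) → Int → PySem.Dict String Int
  | 0, dist, _, _ => dist
  | fuel+1, dist, pending, level =>
      let hit := pending.filter (fun s => s.any (fun a => dist.contains a))
      if hit.isEmpty then dist
      else
        let pending' := pending.filter (fun s => !s.any (fun a => dist.contains a))
        let lv := level + 1
        let dist' := hit.foldl (fun d s => s.foldl (fun d a => d.setdefault a lv) d) dist
        artLoop fuel dist' pending' lv

def erdos_alt (artigos : List (String × List String)) (n : Int) : List String :=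
  -- dist = {"Paul Erdos": 0}; pending = list(artigos.values()); level = 0; while True: …
  let dist := artLoop (artigos.length + 1) (PySem.Dict.mk [("Paul Erdos", 0)])
    (artigos.map Prod.snd) 0
  -- sorted((a for a in dist if dist[a] <= n), key=lambda a: (dist[a], a))
  -- (a is always a key of dist, so dist[a] cannot raise and getD is exact)
  PySem.List.sorted2 (dist.keys.filter (fun a => decide (dist.getD a 0 ≤ n)))
    (fun a => dist.getD a 0) (fun a => a) false

-- ===== PRECONDITION & SPEC =====

-- Pre_ excludes association lists with duplicate keys: the argument is a Python dict
-- (dict[str, set[str]]), which cannot hold two entries with the same key, so the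
-- assoc-list representation is only meaningful (and the ports only faithful) without them.
def Pre_erdos (artigos : List (String × List String)) (n : Int) : Prop :=
  (artigos.map Prod.fst).Nodup
instance (artigos : List (String × List String)) (n : Int) : Decidable (Pre_erdos artigos n) := by
  unfold Pre_erdos; infer_instance

def pvWitness_erdos : (List (String × List String)) × Int :=
  ([("p1", ["Paul Erdos", "a"]), ("p2", ["a", "b"])], 1)

def Spec_erdos (artigos : List (String × List String)) (n : Int) (out : List String) : Prop := out = erdos_alt artigos n
instance (artigos : List (String × List String)) (n : Int) (out : List String) : Decidable (Spec_erdos artigos n out) := by unfold Spec_erdos; infer_instance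

-- ===== CLAIM (what is proved, stated in full; the proofs are below) =====
def Claim_equal_erdos : Prop := ∀ (artigos : List (String × List String)) (n : Int), Dom_erdos artigos n → Pre_erdos artigos n → Spec_erdos artigos n (erdos artigos n)

-- ===== LEMMAS AND PROOFS =====

-- ---- characterising A's graph: w is a neighbour of v iff they share an article ----

-- the inner statement of A's graph-building loop, over one article `full`
def gstep (full : List String) (g : PySem.Dict String (PySem.Set String)) (autor : String) :
    PySem.Dict String (PySem.Set String) :=
  let g1 := if g.contains autor then g else g.insert autor PySem.Set.empty
  g1.insert autor
    (PySem.Set.discard (PySem.Set.union (g1.getD autor PySem.Set.empty) full) autor)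

lemma getD_gstep (full : List String) (g : PySem.Dict String (PySem.Set String))
    (a v : String) :
    ((gstep full g a).getD v PySem.Set.empty : PySem.Set String)
      = if v = a
          then PySem.Set.discard (PySem.Set.union (g.getD a PySem.Set.empty) full) a
          else g.getD v PySem.Set.empty := by
  unfold gstep
  by_cases hc : g.contains a = true
  · simp only [hc, if_true]
    rw [PySem.Dict.getD_insert]
  · have hc' : g.contains a = false := by simpa using hc
    simp only [hc', Bool.false_eq_true, if_false]
    rw [PySem.Dict.getD_insert, PySem.Dict.getD_insert_self]
    by_cases hv : v = a
    · rw [if_pos hv, if_pos hv, PySem.Dict.getD_of_not_contains g _ hc']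
    · rw [if_neg hv, if_neg hv, PySem.Dict.getD_insert_of_ne _ _ _ hv]

lemma innerChar (full : List String) (s : List String) :
    ∀ (g : PySem.Dict String (PySem.Set String)) (v w : String),
    (w ∈ ((s.foldl (gstep full) g).getD v PySem.Set.empty : List String))
      ↔ (if v ∈ s
          then (w ∈ (g.getD v PySem.Set.empty : List String) ∨ w ∈ full) ∧ w ≠ v
          else w ∈ (g.getD v PySem.Set.empty : List String)) := by
  induction s with
  | nil => intro g v w; simp
  | cons a t ih =>
    intro g v w
    simp only [List.foldl_cons]
    rw [ih, getD_gstep]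
    simp only [List.mem_cons]
    split_ifs with h1 h2 h3 <;>
      simp_all [PySem.Set.mem_discard, PySem.Set.mem_union]

lemma outerChar (arts : List (String × List String)) :
    ∀ (g : PySem.Dict String (PySem.Set String)) (v w : String),
    (w ∈ ((arts.foldl (fun g art => art.2.foldl (gstep art.2) g) g).getD v
        PySem.Set.empty : List String))
      ↔ (if ∃ p ∈ arts, v ∈ p.2
          then (w ∈ (g.getD v PySem.Set.empty : List String)
                  ∨ ∃ p ∈ arts, v ∈ p.2 ∧ w ∈ p.2) ∧ w ≠ v
          else w ∈ (g.getD v PySem.Set.empty : List String)) := by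
  induction arts with
  | nil => intro g v w; simp
  | cons p rest ih =>
    intro g v w
    simp only [List.foldl_cons]
    rw [ih, innerChar]
    by_cases hrest : ∃ q ∈ rest, v ∈ q.2
    · rw [if_pos hrest]
      obtain ⟨q0, hq0, hvq0⟩ := hrest
      rw [if_pos (⟨q0, List.mem_cons_of_mem _ hq0, hvq0⟩ : ∃ r ∈ p :: rest, v ∈ r.2)]
      by_cases hp : v ∈ p.2
      · rw [if_pos hp]
        constructor
        · rintro ⟨(⟨h1 | h2, h3⟩ | ⟨q, hq, h5, h6⟩), h4⟩
          · exact ⟨Or.inl h1, h4⟩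
          · exact ⟨Or.inr ⟨p, List.mem_cons_self, hp, h2⟩, h4⟩
          · exact ⟨Or.inr ⟨q, List.mem_cons_of_mem _ hq, h5, h6⟩, h4⟩
        · rintro ⟨h1 | ⟨q, hq, h5, h6⟩, h4⟩
          · exact ⟨Or.inl ⟨Or.inl h1, h4⟩, h4⟩
          · rcases List.mem_cons.1 hq with heq | hq'
            · exact ⟨Or.inl ⟨Or.inr (heq ▸ h6), h4⟩, h4⟩
            · exact ⟨Or.inr ⟨q, hq', h5, h6⟩, h4⟩
      · rw [if_neg hp]
        constructor
        · rintro ⟨h1 | ⟨q, hq, h5, h6⟩, h4⟩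
          · exact ⟨Or.inl h1, h4⟩
          · exact ⟨Or.inr ⟨q, List.mem_cons_of_mem _ hq, h5, h6⟩, h4⟩
        · rintro ⟨h1 | ⟨q, hq, h5, h6⟩, h4⟩
          · exact ⟨Or.inl h1, h4⟩
          · rcases List.mem_cons.1 hq with heq | hq'
            · exact absurd (heq ▸ h5) hp
            · exact ⟨Or.inr ⟨q, hq', h5, h6⟩, h4⟩
    · rw [if_neg hrest]
      by_cases hp : v ∈ p.2
      · rw [if_pos hp, if_pos (⟨p, List.mem_cons_self, hp⟩ : ∃ r ∈ p :: rest, v ∈ r.2)]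
        constructor
        · rintro ⟨h1 | h2, h4⟩
          · exact ⟨Or.inl h1, h4⟩
          · exact ⟨Or.inr ⟨p, List.mem_cons_self, hp, h2⟩, h4⟩
        · rintro ⟨h1 | ⟨q, hq, h5, h6⟩, h4⟩
          · exact ⟨Or.inl h1, h4⟩
          · rcases List.mem_cons.1 hq with heq | hq'
            · exact ⟨Or.inr (heq ▸ h6), h4⟩
            · exact absurd ⟨q, hq', h5⟩ hrest
      · rw [if_neg hp, if_neg (show ¬∃ r ∈ p :: rest, v ∈ r.2 by
          rintro ⟨r, hr, h5⟩
          rcases List.mem_cons.1 hr with heq | hr'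
          · exact hp (heq ▸ h5)
          · exact hrest ⟨r, hr', h5⟩)]

-- the graph built by port A, named for the proofs
def grafoOf (artigos : List (String × List String)) : PySem.Dict String (PySem.Set String) :=
  artigos.foldl (fun g art => art.2.foldl (gstep art.2) g)
    (PySem.Dict.mk [("Paul Erdos", PySem.Set.empty)])

lemma adjChar (artigos : List (String × List String)) (v w : String) :
    (w ∈ (((grafoOf artigos).getD v PySem.Set.empty : PySem.Set String) : List String))
      ↔ (∃ p ∈ artigos, v ∈ p.2 ∧ w ∈ p.2) ∧ w ≠ v := by
  unfold grafoOf
  rw [outerChar]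
  have hg0 : ((PySem.Dict.mk [(("Paul Erdos" : String), (PySem.Set.empty : PySem.Set String))]).getD v
      PySem.Set.empty : List String) = ([] : List String) := by
    by_cases hv : "Paul Erdos" = v <;> simp [PySem.Dict.getD, PySem.Dict.get?, hv, PySem.Set.empty]
  by_cases h : ∃ p ∈ artigos, v ∈ p.2
  · rw [if_pos h, hg0]
    constructor
    · rintro ⟨h1 | h1, h2⟩
      · simp at h1
      · exact ⟨h1, h2⟩
    · rintro ⟨h1, h2⟩; exact ⟨Or.inr h1, h2⟩
  · rw [if_neg h, hg0]
    constructor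
    · intro h1; simp at h1
    · rintro ⟨⟨p, hp, h5, h6⟩, _⟩; exact absurd ⟨p, hp, h5⟩ h

-- ---- abstract description of one BFS layer (A side) ----

-- one scan step of the next-frontier accumulator
def extStep (d0 : PySem.Dict String Int) (acc : List String) (w : String) : List String :=
  if d0.contains w || acc.contains w then acc else acc ++ [w]

def extNode (adj : PySem.Dict String (PySem.Set String)) (d0 : PySem.Dict String Int)
    (acc : List String) (v : String) : List String :=
  (adj.getD v PySem.Set.empty).foldl (extStep d0) acc

-- dist after a layer: every newly found node mapped to k+1
def insL (k : Int) (d0 : PySem.Dict String Int) (acc : List String) : PySem.Dict String Int :=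
  acc.foldl (fun d w => d.insert w (k + 1)) d0

lemma insL_nil (k : Int) (d0 : PySem.Dict String Int) : insL k d0 [] = d0 := rfl

lemma mem_extStep (d0 : PySem.Dict String Int) (acc : List String) (w x : String) :
    x ∈ extStep d0 acc w ↔ x ∈ acc ∨ (x = w ∧ d0.contains w = false) := by
  unfold extStep
  cases hc : d0.contains w || acc.contains w with
  | true =>
    simp only [if_pos rfl]
    rcases Bool.or_eq_true_iff.1 hc with h | h
    · constructor
      · exact Or.inl
      · rintro (h1 | ⟨rfl, h2⟩)
        · exact h1
        · rw [h] at h2; cases h2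
    · constructor
      · exact Or.inl
      · rintro (h1 | ⟨rfl, _⟩)
        · exact h1
        · exact (List.contains_iff_mem).1 h
  | false =>
    obtain ⟨h1, _⟩ := Bool.or_eq_false_iff.1 hc
    simp [h1]

lemma ext_char (d0 : PySem.Dict String Int) (ws : List String) :
    ∀ (acc : List String) (x : String),
    x ∈ ws.foldl (extStep d0) acc ↔ x ∈ acc ∨ (x ∈ ws ∧ d0.contains x = false) := by
  induction ws with
  | nil => intro acc x; simp
  | cons w ws ih =>
    intro acc x
    simp only [List.foldl_cons]
    rw [ih, mem_extStep]
    constructor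
    · rintro ((h | ⟨rfl, h2⟩) | ⟨h1, h2⟩)
      · exact Or.inl h
      · exact Or.inr ⟨List.mem_cons_self, h2⟩
      · exact Or.inr ⟨List.mem_cons_of_mem _ h1, h2⟩
    · rintro (h | ⟨h1, h2⟩)
      · exact Or.inl (Or.inl h)
      · rcases List.mem_cons.1 h1 with rfl | h3
        · exact Or.inl (Or.inr ⟨rfl, h2⟩)
        · exact Or.inr ⟨h3, h2⟩

lemma ext_fresh (d0 : PySem.Dict String Int) (ws : List String) :
    ∀ acc, (∀ x ∈ acc, d0.contains x = false) →
      ∀ x ∈ ws.foldl (extStep d0) acc, d0.contains x = false := by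
  intro acc hacc x hx
  rcases (ext_char d0 ws acc x).1 hx with h | ⟨_, h⟩
  · exact hacc x h
  · exact h

lemma ext_nodup (d0 : PySem.Dict String Int) (ws : List String) :
    ∀ acc, acc.Nodup → (ws.foldl (extStep d0) acc).Nodup := by
  induction ws with
  | nil => intro acc h; exact h
  | cons w ws ih =>
    intro acc hacc
    simp only [List.foldl_cons]
    apply ih
    unfold extStep
    split
    · exact hacc
    · rename_i hc
      have hw : w ∉ acc :=
        ((by simpa using hc : d0.contains w = false ∧ w ∉ acc)).2
      refine List.Nodup.append hacc (List.nodup_singleton w) ?_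
      simpa [List.disjoint_singleton] using hw

lemma get?_foldl_insert_not_mem (acc : List String) (w : String) (x : Int)
    (d : PySem.Dict String Int) (h : w ∉ acc) :
    (acc.foldl (fun d w => d.insert w x) d).get? w = d.get? w := by
  induction acc generalizing d with
  | nil => rfl
  | cons a t ih =>
    simp only [List.mem_cons, not_or] at h
    simp only [List.foldl_cons]
    rw [ih _ h.2, PySem.Dict.get?_insert_of_ne _ _ h.1]

lemma get?_insL_mem (k : Int) (d0 : PySem.Dict String Int) (acc : List String)
    (hnd : acc.Nodup) : ∀ w ∈ acc, (insL k d0 acc).get? w = some (k + 1) := by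
  induction acc generalizing d0 with
  | nil => intro w hw; simp at hw
  | cons a t ih =>
    intro w hw
    rcases List.mem_cons.1 hw with h | h
    · subst h
      have hwt : w ∉ t := (List.nodup_cons.1 hnd).1
      unfold insL
      simp only [List.foldl_cons]
      rw [get?_foldl_insert_not_mem _ _ _ _ hwt, PySem.Dict.get?_insert_self]
    · exact ih _ (List.nodup_cons.1 hnd).2 w h

lemma keys_insL (k : Int) (d0 : PySem.Dict String Int) :
    ∀ acc, (∀ x ∈ acc, d0.contains x = false) → acc.Nodup →
    (insL k d0 acc).keys = d0.keys ++ acc := by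
  intro acc
  induction acc generalizing d0 with
  | nil => intro _ _; simp [insL]
  | cons a t ih =>
    intro hfr hnd
    have ha : d0.contains a = false := hfr a List.mem_cons_self
    unfold insL
    simp only [List.foldl_cons]
    have ht : (insL k (d0.insert a (k + 1)) t).keys = (d0.insert a (k + 1)).keys ++ t := by
      apply ih
      · intro x hx
        have hxa : x ≠ a := by
          rintro rfl
          exact (List.nodup_cons.1 hnd).1 hx
        rw [PySem.Dict.contains_insert]
        simp [hxa, hfr x (List.mem_cons_of_mem _ hx)]
      · exact (List.nodup_cons.1 hnd).2
    show (insL k (d0.insert a (k + 1)) t).keys = d0.keys ++ a :: t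
    rw [ht, PySem.Dict.keys_insert_of_not_contains _ _ ha]
    simp

-- ---- equations of the two fueled loops ----

-- A's per-node queue step (definitionally the lambda in bfsALoop)
def qstep (v : String) (st : PySem.Dict String Int × PySem.Set String × List String)
    (d : String) : PySem.Dict String Int × PySem.Set String × List String :=
  if PySem.Set.contains st.2.1 d then st
  else (st.1.insert d (st.1.getD v 0 + 1), PySem.Set.add st.2.1 d, st.2.2 ++ [d])

lemma bfsALoop_nil (adj : PySem.Dict String (PySem.Set String)) (f : Nat)
    (dist : PySem.Dict String Int) (vis : PySem.Set String) :
    bfsALoop adj f dist vis [] = dist := by cases f <;> rfl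

lemma bfsALoop_cons (adj : PySem.Dict String (PySem.Set String)) (f : Nat)
    (dist : PySem.Dict String Int) (vis : PySem.Set String) (v : String) (q : List String) :
    bfsALoop adj (f + 1) dist vis (v :: q)
      = bfsALoop adj f ((adj.getD v PySem.Set.empty).foldl (qstep v) (dist, vis, q)).1
          ((adj.getD v PySem.Set.empty).foldl (qstep v) (dist, vis, q)).2.1
          ((adj.getD v PySem.Set.empty).foldl (qstep v) (dist, vis, q)).2.2 := rfl

-- a level-synchronous BFS over the graph: proof-internal stepping stone between the ports
def lvlLoop (adj : PySem.Dict String (PySem.Set String)) :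
    Nat → PySem.Dict String Int → PySem.Set String → Int → PySem.Dict String Int
  | _, dist, [], _ => dist
  | 0, dist, _, _ => dist
  | fuel+1, dist, v :: fr, level =>
      let lv := level + 1
      let nxt : PySem.Set String := (v :: fr).foldl (fun nxt v =>
        (adj.getD v PySem.Set.empty).foldl
          (fun nxt w => if dist.contains w then nxt else PySem.Set.add nxt w) nxt)
        PySem.Set.empty
      let dist' := nxt.foldl (fun d w => d.insert w lv) dist
      lvlLoop adj fuel dist' nxt lv

-- B's next-frontier computation (definitionally the inner fold in lvlLoop)
def bnext (adj : PySem.Dict String (PySem.Set String)) (dist : PySem.Dict String Int)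
    (front : List String) : PySem.Set String :=
  front.foldl (fun nxt v =>
    (adj.getD v PySem.Set.empty).foldl
      (fun nxt w => if dist.contains w then nxt else PySem.Set.add nxt w) nxt)
    PySem.Set.empty

lemma lvlLoop_nil (adj : PySem.Dict String (PySem.Set String)) (f : Nat)
    (dist : PySem.Dict String Int) (level : Int) :
    lvlLoop adj f dist [] level = dist := by cases f <;> rfl

lemma lvlLoop_cons (adj : PySem.Dict String (PySem.Set String)) (f : Nat)
    (dist : PySem.Dict String Int) (v : String) (fr : List String) (level : Int) :
    lvlLoop adj (f + 1) dist (v :: fr) level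
      = lvlLoop adj f
          ((bnext adj dist (v :: fr)).foldl (fun d w => d.insert w (level + 1)) dist)
          (bnext adj dist (v :: fr)) (level + 1) := rfl

lemma bnext_eq_extF (adj : PySem.Dict String (PySem.Set String))
    (dist : PySem.Dict String Int) (front : List String) :
    bnext adj dist front = front.foldl (extNode adj dist) [] := by
  unfold bnext extNode
  congr 1
  funext nxt v
  congr 1
  funext a w
  by_cases h : dist.contains w
  · simp [extStep, h]
  · simp [extStep, h, PySem.Set.add]

-- ---- one node of A's queue loop performs one extNode step ----

lemma innerNode (d0 : PySem.Dict String Int) (k : Int) (v : String)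
    (hv : d0.get? v = some k) (ws rest : List String) :
    ∀ acc, (∀ x ∈ acc, d0.contains x = false) → acc.Nodup →
    ws.foldl (qstep v) (insL k d0 acc, d0.keys ++ acc, rest ++ acc)
    = (insL k d0 (ws.foldl (extStep d0) acc), d0.keys ++ ws.foldl (extStep d0) acc,
       rest ++ ws.foldl (extStep d0) acc) := by
  induction ws with
  | nil => intro acc _ _; rfl
  | cons w ws ih =>
    intro acc hfr hnd
    simp only [List.foldl_cons]
    have hcont : List.contains (d0.keys ++ acc) w = (d0.contains w || acc.contains w) := by
      rw [List.contains_eq_mem, List.contains_eq_mem, PySem.Dict.contains_eq_decide_mem_keys]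
      simp [List.mem_append]
    cases hc : d0.contains w || acc.contains w with
    | true =>
      have hq : qstep v (insL k d0 acc, d0.keys ++ acc, rest ++ acc) w
          = (insL k d0 acc, d0.keys ++ acc, rest ++ acc) := by
        unfold qstep PySem.Set.contains
        rw [hcont, hc]
        simp
      have he : extStep d0 acc w = acc := by unfold extStep; rw [hc]; simp
      rw [hq, he]
      exact ih acc hfr hnd
    | false =>
      obtain ⟨h1, h2⟩ := Bool.or_eq_false_iff.1 hc
      have hwacc : w ∉ acc := by rw [List.contains_eq_mem] at h2; simpa using h2
      have hvacc : v ∉ acc := by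
        intro hmem
        have h3 := hfr v hmem
        rw [PySem.Dict.contains_eq_isSome_get?, hv] at h3
        simp at h3
      have hg : (insL k d0 acc).get? v = some k := by
        unfold insL
        rw [get?_foldl_insert_not_mem _ _ _ _ hvacc, hv]
      have hgv : (insL k d0 acc).getD v 0 = k := by
        simp [PySem.Dict.getD, hg]
      have hq : qstep v (insL k d0 acc, d0.keys ++ acc, rest ++ acc) w
          = (insL k d0 (acc ++ [w]), d0.keys ++ (acc ++ [w]), rest ++ (acc ++ [w])) := by
        unfold qstep PySem.Set.contains PySem.Set.add
        rw [hcont, hc]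
        simp only [Bool.false_eq_true, if_false]
        have c1 : (insL k d0 acc).insert w ((insL k d0 acc).getD v 0 + 1)
            = insL k d0 (acc ++ [w]) := by
          rw [hgv]
          unfold insL
          rw [List.foldl_append]
          rfl
        rw [c1, List.append_assoc, List.append_assoc,
          show PySem.Set.contains (d0.keys ++ acc) w = false from hcont.trans hc]
        simp
      have he : extStep d0 acc w = acc ++ [w] := by unfold extStep; rw [hc]; simp
      rw [hq, he]
      refine ih (acc ++ [w]) ?_ ?_
      · intro x hx
        rcases List.mem_append.1 hx with h | h
        · exact hfr x h
        · simp only [List.mem_singleton] at h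
          rw [h]; exact h1
      · refine List.Nodup.append hnd (List.nodup_singleton w) ?_
        simpa [List.disjoint_singleton] using hwacc

lemma innerQ (adj : PySem.Dict String (PySem.Set String)) (d0 : PySem.Dict String Int) (k : Int) :
    ∀ (Q1 : List String) (fA : Nat) (acc : List String),
    (∀ x ∈ Q1, d0.get? x = some k) →
    (∀ x ∈ acc, d0.contains x = false) → acc.Nodup →
    bfsALoop adj (Q1.length + fA) (insL k d0 acc) (d0.keys ++ acc) (Q1 ++ acc)
      = bfsALoop adj fA (insL k d0 (Q1.foldl (extNode adj d0) acc))
          (d0.keys ++ Q1.foldl (extNode adj d0) acc) (Q1.foldl (extNode adj d0) acc) := by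
  intro Q1
  induction Q1 with
  | nil => intro fA acc hQ hfr hnd; simp
  | cons v Q1 ih =>
    intro fA acc hQ hfr hnd
    have hlen : (v :: Q1).length + fA = (Q1.length + fA) + 1 := by
      simp [List.length_cons]; omega
    rw [hlen]
    show bfsALoop adj (Q1.length + fA + 1) (insL k d0 acc) (d0.keys ++ acc) (v :: (Q1 ++ acc)) = _
    rw [bfsALoop_cons,
      innerNode d0 k v (hQ v List.mem_cons_self) (adj.getD v PySem.Set.empty) Q1 acc hfr hnd]
    simp only [List.foldl_cons]
    exact ih fA ((adj.getD v PySem.Set.empty).foldl (extStep d0) acc)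
      (fun x hx => hQ x (List.mem_cons_of_mem _ hx))
      (ext_fresh d0 _ acc hfr) (ext_nodup d0 _ acc hnd)

-- ---- folded ext lemmas over a whole frontier ----

lemma extF_char (adj : PySem.Dict String (PySem.Set String)) (d0 : PySem.Dict String Int) :
    ∀ (front acc : List String) (x : String),
    x ∈ front.foldl (extNode adj d0) acc
      ↔ x ∈ acc ∨ ((∃ v ∈ front, x ∈ (adj.getD v PySem.Set.empty : List String))
                    ∧ d0.contains x = false) := by
  intro front
  induction front with
  | nil => intro acc x; simp
  | cons v fr ih =>
    intro acc x
    simp only [List.foldl_cons]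
    rw [ih]
    unfold extNode
    rw [ext_char]
    constructor
    · rintro ((h | ⟨h1, h2⟩) | ⟨⟨v', hv', h1⟩, h2⟩)
      · exact Or.inl h
      · exact Or.inr ⟨⟨v, List.mem_cons_self, h1⟩, h2⟩
      · exact Or.inr ⟨⟨v', List.mem_cons_of_mem _ hv', h1⟩, h2⟩
    · rintro (h | ⟨⟨v', hv', h1⟩, h2⟩)
      · exact Or.inl (Or.inl h)
      · rcases List.mem_cons.1 hv' with rfl | h3
        · exact Or.inl (Or.inr ⟨h1, h2⟩)
        · exact Or.inr ⟨⟨v', h3, h1⟩, h2⟩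

lemma extF_fresh (adj : PySem.Dict String (PySem.Set String)) (d0 : PySem.Dict String Int) :
    ∀ (front acc : List String), (∀ x ∈ acc, d0.contains x = false) →
    ∀ x ∈ front.foldl (extNode adj d0) acc, d0.contains x = false := by
  intro front acc h x hx
  rcases (extF_char adj d0 front acc x).1 hx with h1 | ⟨_, h1⟩
  · exact h x h1
  · exact h1

lemma extF_nodup (adj : PySem.Dict String (PySem.Set String)) (d0 : PySem.Dict String Int) :
    ∀ (front acc : List String), acc.Nodup → (front.foldl (extNode adj d0) acc).Nodup := by
  intro front
  induction front with
  | nil => intro acc h; exact h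
  | cons v fr ih =>
    intro acc h
    simp only [List.foldl_cons]
    exact ih _ (ext_nodup d0 _ acc h)

lemma extF_mem (adj : PySem.Dict String (PySem.Set String)) (d0 : PySem.Dict String Int) :
    ∀ (front acc : List String) (x : String), x ∈ front.foldl (extNode adj d0) acc →
    x ∈ acc ∨ ∃ v, x ∈ (adj.getD v PySem.Set.empty : List String) := by
  intro front acc x h
  rcases (extF_char adj d0 front acc x).1 h with h1 | ⟨⟨v, _, h1⟩, _⟩
  · exact Or.inl h1
  · exact Or.inr ⟨v, h1⟩

-- ---- counting lemma for the fuel ----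

lemma length_filter_partition (L : List String) (p : String → Bool) :
    (L.filter p).length + (L.filter (fun x => !p x)).length = L.length := by
  induction L with
  | nil => rfl
  | cons a t ih => cases h : p a <;> simp [h] <;> omega

lemma filter_sub_length (L nxt : List String) (hn : nxt.Nodup)
    (hsub : ∀ x ∈ nxt, x ∈ L) :
    (L.filter (fun u => !nxt.contains u)).length + nxt.length ≤ L.length := by
  have hsub2 : ∀ x ∈ nxt, x ∈ L.filter (fun u => nxt.contains u) := by
    intro x hx
    rw [List.mem_filter]
    exact ⟨hsub x hx, by rw [List.contains_eq_mem]; simp [hx]⟩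
  have h1 : nxt.length ≤ (L.filter (fun u => nxt.contains u)).length := by
    calc nxt.length = nxt.toFinset.card := (List.toFinset_card_of_nodup hn).symm
      _ ≤ (L.filter (fun u => nxt.contains u)).toFinset.card := by
          apply Finset.card_le_card
          intro x hx
          rw [List.mem_toFinset] at *
          exact hsub2 x (by assumption)
      _ ≤ (L.filter (fun u => nxt.contains u)).length := List.toFinset_card_le _
  have h2 := length_filter_partition L (fun u => nxt.contains u)
  omega

-- ---- the queue BFS equals the level-synchronous BFS ----

lemma mainSim (adj : PySem.Dict String (PySem.Set String)) (U : List String)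
    (hU : ∀ v : String, ∀ w ∈ (adj.getD v PySem.Set.empty : List String), w ∈ U)
    (hUnd : U.Nodup) :
    ∀ (fB fA : Nat) (d0 : PySem.Dict String Int) (front : List String) (k : Int),
    (∀ v ∈ front, d0.get? v = some k) → d0.keys.Nodup →
    front.length + (U.filter (fun u => !d0.contains u)).length ≤ fA →
    (U.filter (fun u => !d0.contains u)).length + 1 ≤ fB →
    bfsALoop adj fA d0 d0.keys front = lvlLoop adj fB d0 front k := by
  intro fB
  induction fB with
  | zero =>
    intro fA d0 front k hk hnd hfA hfB
    cases front with
    | nil => rw [bfsALoop_nil, lvlLoop_nil]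
    | cons v fr => exact absurd hfB (by omega)
  | succ fb ih =>
    intro fA d0 front k hk hnd hfA hfB
    cases front with
    | nil => rw [bfsALoop_nil, lvlLoop_nil]
    | cons v fr =>
      rw [lvlLoop_cons, bnext_eq_extF]
      show _ = lvlLoop adj fb (insL k d0 ((v :: fr).foldl (extNode adj d0) []))
        ((v :: fr).foldl (extNode adj d0) []) (k + 1)
      have hsplit : fA = (v :: fr).length + (fA - (v :: fr).length) := by
        have := hfA; omega
      rw [hsplit]
      have h0 := innerQ adj d0 k (v :: fr) (fA - (v :: fr).length) [] hk (by simp) List.nodup_nil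
      simp only [insL_nil, List.append_nil] at h0
      rw [h0]
      have hfreshn : ∀ x ∈ (v :: fr).foldl (extNode adj d0) [], d0.contains x = false :=
        extF_fresh adj d0 (v :: fr) [] (by simp)
      have hndn : ((v :: fr).foldl (extNode adj d0) []).Nodup :=
        extF_nodup adj d0 (v :: fr) [] List.nodup_nil
      by_cases hnx : (v :: fr).foldl (extNode adj d0) [] = []
      · rw [hnx, bfsALoop_nil, lvlLoop_nil]
      · have hlen1 : 1 ≤ ((v :: fr).foldl (extNode adj d0) []).length := by
          cases h : (v :: fr).foldl (extNode adj d0) [] with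
          | nil => exact absurd h hnx
          | cons a b => simp
        have hkeysn : (insL k d0 ((v :: fr).foldl (extNode adj d0) [])).keys
            = d0.keys ++ (v :: fr).foldl (extNode adj d0) [] :=
          keys_insL k d0 _ hfreshn hndn
        rw [← hkeysn]
        have hconKey : ∀ u, (insL k d0 ((v :: fr).foldl (extNode adj d0) [])).contains u
            = (d0.contains u || ((v :: fr).foldl (extNode adj d0) []).contains u) := by
          intro u
          have boolext : ∀ (a b : Bool), ((a = true) ↔ (b = true)) → a = b := by decide
          refine boolext _ _ ?_
          rw [Bool.or_eq_true, PySem.Dict.contains_iff_mem_keys,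
            PySem.Dict.contains_iff_mem_keys, List.contains_iff_mem, hkeysn, List.mem_append]
        have hfiltereq : U.filter (fun u => !(insL k d0 ((v :: fr).foldl (extNode adj d0) [])).contains u)
            = (U.filter (fun u => !d0.contains u)).filter
                (fun u => !((v :: fr).foldl (extNode adj d0) []).contains u) := by
          rw [List.filter_filter]
          apply List.filter_congr
          intro u _
          rw [hconKey u]
          simp [Bool.not_or, Bool.and_comm]
        have hsubnL : ∀ x ∈ (v :: fr).foldl (extNode adj d0) [],
            x ∈ U.filter (fun u => !d0.contains u) := by
          intro x hx
          rw [List.mem_filter]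
          constructor
          · rcases extF_mem adj d0 (v :: fr) [] x hx with h | ⟨v', hv'⟩
            · simp at h
            · exact hU v' x hv'
          · simp [hfreshn x hx]
        have harith := filter_sub_length (U.filter (fun u => !d0.contains u))
          ((v :: fr).foldl (extNode adj d0) []) hndn hsubnL
        refine ih (fA - (v :: fr).length) _ _ (k + 1)
          (get?_insL_mem k d0 _ hndn) ?_ ?_ ?_
        · rw [hkeysn]
          refine List.Nodup.append hnd hndn ?_
          intro a ha hb
          have h4 := hfreshn a hb
          rw [PySem.Dict.contains_eq_decide_mem_keys] at h4
          simp [ha] at h4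
        · rw [hfiltereq]
          have h5 : ((v :: fr).foldl (extNode adj d0) []).length
              + ((U.filter (fun u => !d0.contains u)).filter
                  (fun u => !((v :: fr).foldl (extNode adj d0) []).contains u)).length
              ≤ (U.filter (fun u => !d0.contains u)).length := by omega
          have h6 : (v :: fr).length + (U.filter (fun u => !d0.contains u)).length ≤ fA := hfA
          omega
        · rw [hfiltereq]
          omega

lemma bfs_eq_lvl (G : PySem.Dict String (PySem.Set String)) :
    bfsA G "Paul Erdos"
      = lvlLoop G ((PySem.List.dedup G.values.flatten).length + 2)
          (PySem.Dict.mk [("Paul Erdos", 0)]) (PySem.Set.add PySem.Set.empty "Paul Erdos") 0 := by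
  unfold bfsA
  have hU : ∀ v : String, ∀ w ∈ (G.getD v PySem.Set.empty : List String),
      w ∈ PySem.List.dedup G.values.flatten := by
    intro v w hw
    cases hg : G.get? v with
    | none => simp [PySem.Dict.getD, hg, PySem.Set.empty] at hw
    | some s =>
      have hw' : w ∈ s := by simpa [PySem.Dict.getD, hg] using hw
      have hs : s ∈ G.values :=
        List.mem_map_of_mem (PySem.Dict.mem_items_of_get?_eq_some _ hg)
      exact (PySem.List.mem_dedup _ _).2 (List.mem_flatten.2 ⟨s, hs, hw'⟩)
  have hcnt := List.length_filter_le
    (fun u => !(PySem.Dict.mk [(("Paul Erdos" : String), (0 : Int))]).contains u)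
    (PySem.List.dedup G.values.flatten)
  exact mainSim G (PySem.List.dedup G.values.flatten) hU (PySem.List.nodup_dedup _)
    ((PySem.List.dedup G.values.flatten).length + 2)
    ((PySem.List.dedup G.values.flatten).length + 1)
    (PySem.Dict.mk [("Paul Erdos", 0)]) ["Paul Erdos"] 0
    (by intro x hx; simp only [List.mem_singleton] at hx; rw [hx]; rfl)
    (by simp [PySem.Dict.keys])
    (by simp only [List.length_cons, List.length_nil]; omega)
    (by omega)

-- ---- setdefault folds of the article loop ----

lemma foldl_foldl_flatten (L : List (List String)) (f : PySem.Dict String Int → String → PySem.Dict String Int) :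
    ∀ d, L.foldl (fun d s => s.foldl f d) d = L.flatten.foldl f d := by
  induction L with
  | nil => intro d; rfl
  | cons s t ih => intro d; simp only [List.foldl_cons, List.flatten_cons, List.foldl_append]; exact ih _

lemma get?_foldl_setdefault (lv : Int) (l : List String) :
    ∀ (d : PySem.Dict String Int) (x : String),
    (l.foldl (fun d a => d.setdefault a lv) d).get? x
      = if x ∈ l then some ((d.get? x).getD lv) else d.get? x := by
  induction l with
  | nil => intro d x; simp
  | cons a t ih =>
    intro d x
    simp only [List.foldl_cons]
    rw [ih]
    by_cases hx : x = a
    · subst hx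
      by_cases ht : x ∈ t
      · rw [if_pos ht, if_pos List.mem_cons_self, PySem.Dict.get?_setdefault_self]
        simp
      · rw [if_neg ht, if_pos List.mem_cons_self, PySem.Dict.get?_setdefault_self]
    · rw [PySem.Dict.get?_setdefault_of_ne _ _ hx]
      by_cases ht : x ∈ t
      · rw [if_pos ht, if_pos (List.mem_cons_of_mem _ ht)]
      · rw [if_neg ht, if_neg (by simp [hx, ht])]

lemma nodup_keys_foldl_setdefault (lv : Int) (l : List String) :
    ∀ (d : PySem.Dict String Int), d.keys.Nodup →
    (l.foldl (fun d a => d.setdefault a lv) d).keys.Nodup := by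
  induction l with
  | nil => intro d h; exact h
  | cons a t ih =>
    intro d h
    simp only [List.foldl_cons]
    apply ih
    by_cases hc : d.contains a
    · rw [PySem.Dict.setdefault_of_contains _ _ hc]; exact h
    · rw [PySem.Dict.setdefault_of_not_contains _ _ (by simpa using hc)]
      exact PySem.Dict.nodup_keys_insert _ _ _ h

lemma nodup_keys_artLoop :
    ∀ (f : Nat) (d : PySem.Dict String Int) (pending : List (List String)) (k : Int),
    d.keys.Nodup → (artLoop f d pending k).keys.Nodup := by
  intro f
  induction f with
  | zero => intro d pending k h; exact h
  | succ f ih =>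
    intro d pending k h
    show ((if (pending.filter (fun s => s.any (fun a => d.contains a))).isEmpty then d else _) : PySem.Dict String Int).keys.Nodup
    split
    · exact h
    · apply ih
      rw [foldl_foldl_flatten]
      exact nodup_keys_foldl_setdefault _ _ _ h

lemma nodup_keys_lvlLoop (G : PySem.Dict String (PySem.Set String)) :
    ∀ (f : Nat) (d : PySem.Dict String Int) (front : PySem.Set String) (k : Int),
    d.keys.Nodup → (lvlLoop G f d front k).keys.Nodup := by
  intro f
  induction f with
  | zero =>
    intro d front k h
    cases front with
    | nil => exact h
    | cons v fr => exact h
  | succ f ih =>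
    intro d front k h
    cases front with
    | nil => exact h
    | cons v fr =>
      rw [lvlLoop_cons, bnext_eq_extF]
      apply ih
      have hfr : ∀ x ∈ (v :: fr).foldl (extNode G d) [], d.contains x = false :=
        extF_fresh G d (v :: fr) [] (by simp)
      have hnd : ((v :: fr).foldl (extNode G d) []).Nodup :=
        extF_nodup G d (v :: fr) [] List.nodup_nil
      have : ((insL k d ((v :: fr).foldl (extNode G d) []))).keys
          = d.keys ++ (v :: fr).foldl (extNode G d) [] := keys_insL k d _ hfr hnd
      show (insL k d ((v :: fr).foldl (extNode G d) [])).keys.Nodup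
      rw [this]
      refine List.Nodup.append h hnd ?_
      intro a ha hb
      have h4 := hfr a hb
      rw [PySem.Dict.contains_eq_decide_mem_keys] at h4
      simp [ha] at h4

-- ---- the level-synchronous BFS equals the article-level loop ----

lemma artLoop_succ (f : Nat) (d : PySem.Dict String Int) (pending : List (List String)) (k : Int) :
    artLoop (f + 1) d pending k
      = (if (pending.filter (fun s => s.any (fun a => d.contains a))).isEmpty then d
         else artLoop f
           ((pending.filter (fun s => s.any (fun a => d.contains a))).foldl
              (fun d s => s.foldl (fun d a => d.setdefault a (k + 1)) d) d)
           (pending.filter (fun s => !s.any (fun a => d.contains a))) (k + 1)) := rfl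

lemma simLoop (arts : List (List String)) (G : PySem.Dict String (PySem.Set String))
    (hadj : ∀ v w : String, w ∈ (G.getD v PySem.Set.empty : List String)
        ↔ ((∃ s ∈ arts, v ∈ s ∧ w ∈ s) ∧ w ≠ v))
    (U : List String)
    (hU : ∀ v : String, ∀ w ∈ (G.getD v PySem.Set.empty : List String), w ∈ U) :
    ∀ (fB fA : Nat) (dA dB : PySem.Dict String Int) (front : List String)
      (pending : List (List String)) (k : Int),
    (∀ a, dA.get? a = dB.get? a) →
    (∀ v ∈ front, dB.contains v = true) →
    (∀ s ∈ arts, s ∉ pending → ∀ w ∈ s, dB.contains w = true) →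
    (∀ s ∈ pending, s ∈ arts) →
    (∀ s ∈ pending, ∀ w ∈ s, dB.contains w = true → w ∈ front) →
    (front ≠ [] → (U.filter (fun u => !dA.contains u)).length + 2 ≤ fA) →
    pending.length + 1 ≤ fB →
    ∀ a, (lvlLoop G fA dA front k).get? a = (artLoop fB dB pending k).get? a := by
  intro fB
  induction fB with
  | zero => intro fA dA dB front pending k _ _ _ _ _ _ hfB; omega
  | succ fb ih =>
    intro fA dA dB front pending k hpt hfront habs hsub htouch hfA hfB
    have hcont : ∀ x, dA.contains x = dB.contains x := by
      intro x
      rw [PySem.Dict.contains_eq_isSome_get?, PySem.Dict.contains_eq_isSome_get?, hpt]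
    cases front with
    | nil =>
      rw [lvlLoop_nil, artLoop_succ]
      have hhit : pending.filter (fun s => s.any (fun a => dB.contains a)) = [] := by
        rw [List.filter_eq_nil_iff]
        intro s hs
        simp only [Bool.not_eq_true, List.any_eq_false]
        intro w hw
        cases hc : dB.contains w with
        | false => rfl
        | true => exact absurd (htouch s hs w hw hc) (by simp)
      rw [hhit]
      simp only [List.isEmpty_nil, if_pos rfl]
      intro a; exact hpt a
    | cons v fr =>
      have hfA2 : (U.filter (fun u => !dA.contains u)).length + 2 ≤ fA := hfA (by simp)
      obtain ⟨fA', rfl⟩ : ∃ m, fA = m + 1 := ⟨fA - 1, by omega⟩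
      rw [lvlLoop_cons, bnext_eq_extF, artLoop_succ]
      -- the new layer on A's side
      set NA := (v :: fr).foldl (extNode G dA) [] with hNA
      have hNAfresh : ∀ x ∈ NA, dA.contains x = false := extF_fresh G dA (v :: fr) [] (by simp)
      have hNAnd : NA.Nodup := extF_nodup G dA (v :: fr) [] List.nodup_nil
      set hitL := pending.filter (fun s => s.any (fun a => dB.contains a)) with hhitL
      -- membership in the new layer, in article terms
      have hNAchar : ∀ x, x ∈ NA ↔
          ((∃ v' ∈ v :: fr, x ∈ (G.getD v' PySem.Set.empty : List String))
            ∧ dA.contains x = false) := by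
        intro x
        rw [hNA, extF_char]
        simp
      -- every element of the new layer comes from a hit article, and conversely
      have hNA_to_hit : ∀ x ∈ NA, x ∈ hitL.flatten := by
        intro x hx
        obtain ⟨⟨v', hv', hadjx⟩, hfresh⟩ := (hNAchar x).1 hx
        obtain ⟨⟨s, hs, hvs, hxs⟩, _⟩ := (hadj v' x).1 hadjx
        have hspending : s ∈ pending := by
          by_contra hnp
          have := habs s hs hnp x hxs
          rw [← hcont] at this
          rw [hfresh] at this; cases this
        refine List.mem_flatten.2 ⟨s, ?_, hxs⟩
        rw [hhitL, List.mem_filter]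
        exact ⟨hspending, List.any_eq_true.2 ⟨v', hvs, hfront v' hv'⟩⟩
      have hhit_to_NA : ∀ x, x ∈ hitL.flatten → dB.contains x = false → x ∈ NA := by
        intro x hx hfresh
        obtain ⟨s, hs, hxs⟩ := List.mem_flatten.1 hx
        rw [hhitL, List.mem_filter] at hs
        obtain ⟨hsp, hany⟩ := hs
        obtain ⟨w0, hw0s, hw0c⟩ := List.any_eq_true.1 hany
        have hw0f : w0 ∈ v :: fr := htouch s hsp w0 hw0s hw0c
        refine (hNAchar x).2 ⟨⟨w0, hw0f, ?_⟩, by rw [hcont]; exact hfresh⟩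
        refine (hadj w0 x).2 ⟨⟨s, hsub s hsp, hw0s, hxs⟩, ?_⟩
        intro hxw
        rw [hxw] at hfresh
        rw [hfresh] at hw0c; cases hw0c
      -- get? of B's updated dict
      have hBget : ∀ x, (hitL.foldl (fun d s => s.foldl (fun d a => d.setdefault a (k + 1)) d) dB).get? x
          = if x ∈ hitL.flatten then some ((dB.get? x).getD (k + 1)) else dB.get? x := by
        intro x
        rw [foldl_foldl_flatten, get?_foldl_setdefault]
      by_cases hhit : hitL = []
      · -- no article is touched: A's layer is empty too, both loops stop with their dicts
        have hNAnil : NA = [] := by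
          rw [List.eq_nil_iff_forall_not_mem]
          intro x hx
          have := hNA_to_hit x hx
          rw [hhit] at this
          simp at this
        rw [hhit]
        simp only [List.isEmpty_nil, if_pos rfl]
        show ∀ a, (lvlLoop G fA' ((NA.foldl (fun d w => d.insert w (k+1)) dA)) NA (k+1)).get? a = dB.get? a
        rw [hNAnil]
        simp only [List.foldl_nil]
        rw [lvlLoop_nil]
        exact hpt
      · have hne : hitL.isEmpty = false := by
          cases h : hitL with
          | nil => exact absurd h hhit
          | cons a b => rfl
        rw [if_neg (by simp [hne])]
        -- one round on each side; recurse
        set dA' := NA.foldl (fun d w => d.insert w (k + 1)) dA with hdA'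
        set dB' := hitL.foldl (fun d s => s.foldl (fun d a => d.setdefault a (k + 1)) d) dB with hdB'
        set pending' := pending.filter (fun s => !s.any (fun a => dB.contains a)) with hpending'
        have hdA'insL : dA' = insL k dA NA := rfl
        have hAget : ∀ x, dA'.get? x = if x ∈ NA then some (k + 1) else dA.get? x := by
          intro x
          by_cases hx : x ∈ NA
          · rw [if_pos hx, hdA'insL]; exact get?_insL_mem k dA NA hNAnd x hx
          · rw [if_neg hx, hdA'insL]
            exact get?_foldl_insert_not_mem NA x (k + 1) dA hx
        have hpt' : ∀ x, dA'.get? x = dB'.get? x := by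
          intro x
          rw [hAget, hBget]
          by_cases hx : x ∈ NA
          · rw [if_pos hx, if_pos (hNA_to_hit x hx)]
            have h1 : dB.get? x = none := by
              have := hNAfresh x hx
              rw [hcont, PySem.Dict.contains_eq_isSome_get?] at this
              exact Option.not_isSome_iff_eq_none.1 (by simp [this])
            rw [h1]; rfl
          · rw [if_neg hx]
            by_cases hh : x ∈ hitL.flatten
            · rw [if_pos hh]
              cases hc : dB.contains x with
              | false => exact absurd (hhit_to_NA x hh hc) hx
              | true =>
                have : (dB.get? x).isSome := by
                  rw [← PySem.Dict.contains_eq_isSome_get?]; exact hc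
                obtain ⟨y, hy⟩ := Option.isSome_iff_exists.1 this
                rw [hpt, hy]; rfl
            · rw [if_neg hh]; exact hpt x
        have hcont' : ∀ x, dB'.contains x
            = (dB.contains x || decide (x ∈ hitL.flatten)) := by
          intro x
          rw [PySem.Dict.contains_eq_isSome_get?, hBget]
          by_cases hh : x ∈ hitL.flatten
          · simp [hh]
          · rw [if_neg hh, ← PySem.Dict.contains_eq_isSome_get?]
            simp [hh]
        refine ih fA' dA' dB' NA pending' (k + 1) hpt' ?_ ?_ ?_ ?_ ?_ ?_ 
        · -- the new frontier is inside dB'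
          intro x hx
          rw [hcont' x]
          simp [hNA_to_hit x hx]
        · -- consumed articles are fully known
          intro s hs hnp w hw
          rw [hcont' w]
          by_cases hsp : s ∈ pending
          · have hsh : s ∈ hitL := by
              rw [hhitL, List.mem_filter]
              refine ⟨hsp, ?_⟩
              by_contra hna
              have : s ∈ pending' := by
                rw [hpending', List.mem_filter]
                exact ⟨hsp, by simpa using hna⟩
              exact hnp this
            have : w ∈ hitL.flatten := List.mem_flatten.2 ⟨s, hsh, hw⟩
            simp [this]
          · have := habs s hs hsp w hw
            simp [this]
        · intro s hs
          exact hsub s ((List.mem_filter.1 (by rw [hpending'] at hs; exact hs)).1)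
        · -- pending' touches dB' only in the new frontier
          intro s hs w hw hcw
          rw [hpending', List.mem_filter] at hs
          obtain ⟨hsp, hdisj⟩ := hs
          have hfreshw : dB.contains w = false := by
            have := List.any_eq_false.1 (by simpa using hdisj) w hw
            simpa using this
          rw [hcont' w, hfreshw] at hcw
          simp only [Bool.false_or, decide_eq_true_eq] at hcw
          exact hhit_to_NA w hcw hfreshw
        · -- fuel on A's side
          intro hNAne
          have hsubU : ∀ x ∈ NA, x ∈ U.filter (fun u => !dA.contains u) := by
            intro x hx
            rw [List.mem_filter]
            obtain ⟨⟨v', _, hadjx⟩, hfresh⟩ := (hNAchar x).1 hx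
            exact ⟨hU v' x hadjx, by simp [hfresh]⟩
          have harith := filter_sub_length (U.filter (fun u => !dA.contains u)) NA hNAnd hsubU
          have hconKey : ∀ u, dA'.contains u = (dA.contains u || NA.contains u) := by
            intro u
            rw [PySem.Dict.contains_eq_isSome_get?, hAget,
              PySem.Dict.contains_eq_isSome_get?]
            by_cases hu : u ∈ NA
            · simp [hu]
            · rw [if_neg hu]
              simp [hu]
          have hfeq : U.filter (fun u => !dA'.contains u)
              = (U.filter (fun u => !dA.contains u)).filter (fun u => !NA.contains u) := by
            rw [List.filter_filter]
            apply List.filter_congr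
            intro u _
            rw [hconKey u]
            simp [Bool.not_or, Bool.and_comm]
          have hlen1 : 1 ≤ NA.length := by
            cases h : NA with
            | nil => exact absurd h (by intro hh; exact hNAne hh)
            | cons a b => simp
          rw [hfeq]
          omega
        · -- fuel on B's side: pending strictly shrinks
          have hdrop : pending'.length < pending.length := by
            obtain ⟨s0, hs0⟩ : ∃ s0, s0 ∈ hitL := by
              cases h : hitL with
              | nil => exact absurd h hhit
              | cons a b => exact ⟨a, List.mem_cons_self⟩
            rw [hhitL, List.mem_filter] at hs0
            rw [hpending']
            refine List.length_filter_lt_length_iff_exists.2 ⟨s0, hs0.1, ?_⟩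
            simp [hs0.2]
          omega

-- ---- sorted2 with an identity tie-break is a lexicographic sort ----

lemma sorted2_eq_lex (xs : List String) (k1 : String → Int) :
    PySem.List.sorted2 xs k1 (fun a => a) false
      = PySem.List.sorted xs (fun a => (toLex (k1 a, a) : Int ×ₗ String)) false := by
  simp only [PySem.List.sorted2, PySem.List.sorted]
  congr 1
  funext acc x
  congr 1
  funext a b
  by_cases hlt : k1 a < k1 b
  · have h1 : (toLex (k1 a, a) : Int ×ₗ String) < toLex (k1 b, b) :=
      Prod.Lex.lt_iff.2 (Or.inl hlt)
    simp [hlt, h1]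
  · by_cases hgt : k1 b < k1 a
    · have h1 : ¬ ((toLex (k1 a, a) : Int ×ₗ String) < toLex (k1 b, b)) := by
        intro hcontra
        rcases Prod.Lex.lt_iff.1 hcontra with h | ⟨he, _⟩
        · simp only [ofLex_toLex] at h; omega
        · simp only [ofLex_toLex] at he; omega
      simp [hlt, hgt, h1]
    · have heq : k1 a = k1 b := by omega
      by_cases hs : a.toList < b.toList
      · have h1 : (toLex (k1 a, a) : Int ×ₗ String) < toLex (k1 b, b) :=
          Prod.Lex.lt_iff.2 (Or.inr ⟨heq, String.lt_iff_toList_lt.2 hs⟩)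
        simp [hlt, hgt, hs, h1]
      · have h1 : ¬ ((toLex (k1 a, a) : Int ×ₗ String) < toLex (k1 b, b)) := by
          intro hcontra
          rcases Prod.Lex.lt_iff.1 hcontra with h | ⟨_, hsl⟩
          · simp only [ofLex_toLex] at h; omega
          · simp only [ofLex_toLex] at hsl
            exact hs (String.lt_iff_toList_lt.1 hsl)
        simp [hlt, hgt, hs, h1]

lemma sorted2_congr_perm (xs ys : List String) (k1 : String → Int) (h : xs.Perm ys) :
    PySem.List.sorted2 xs k1 (fun a => a) false
      = PySem.List.sorted2 ys k1 (fun a => a) false := by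
  rw [sorted2_eq_lex, sorted2_eq_lex]
  refine PySem.List.sorted_eq_sorted_of_perm xs ys _ ?_ h
  intro a b hab
  have := congrArg (fun p : Int ×ₗ String => (ofLex p).2) hab
  simpa using this

-- ===== VERDICT (by name: the statement is the Claim_ definition above) =====
theorem erdos_spec : Claim_equal_erdos := by
  intro artigos n _ _
  show erdos artigos n = erdos_alt artigos n
  simp only [erdos, erdos_alt]
  have hG : (artigos.foldl (fun grafo art =>
      art.2.foldl (fun grafo autor =>
        let grafo := if grafo.contains autor then grafo else grafo.insert autor PySem.Set.empty
        grafo.insert autor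
          (PySem.Set.discard (PySem.Set.union (grafo.getD autor PySem.Set.empty) art.2) autor))
        grafo)
      (PySem.Dict.mk [("Paul Erdos", PySem.Set.empty)])) = grafoOf artigos := rfl
  rw [hG]
  set G := grafoOf artigos with hGdef
  set dA := bfsA G "Paul Erdos" with hdA
  set dB := artLoop (artigos.length + 1) (PySem.Dict.mk [("Paul Erdos", 0)])
    (artigos.map Prod.snd) 0 with hdB
  -- pointwise equality of the two distance dicts
  have hadj : ∀ v w : String, w ∈ (G.getD v PySem.Set.empty : List String)
      ↔ ((∃ s ∈ artigos.map Prod.snd, v ∈ s ∧ w ∈ s) ∧ w ≠ v) := by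
    intro v w
    rw [hGdef]
    rw [adjChar artigos v w]
    constructor
    · rintro ⟨⟨p, hp, h1, h2⟩, h3⟩
      exact ⟨⟨p.2, List.mem_map_of_mem hp, h1, h2⟩, h3⟩
    · rintro ⟨⟨s, hs, h1, h2⟩, h3⟩
      obtain ⟨p, hp, rfl⟩ := List.mem_map.1 hs
      exact ⟨⟨p, hp, h1, h2⟩, h3⟩
  have hU : ∀ v : String, ∀ w ∈ (G.getD v PySem.Set.empty : List String),
      w ∈ PySem.List.dedup G.values.flatten := by
    intro v w hw
    cases hg : G.get? v with
    | none => simp [PySem.Dict.getD, hg, PySem.Set.empty] at hw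
    | some s =>
      have hw' : w ∈ s := by simpa [PySem.Dict.getD, hg] using hw
      have hs : s ∈ G.values :=
        List.mem_map_of_mem (PySem.Dict.mem_items_of_get?_eq_some _ hg)
      exact (PySem.List.mem_dedup _ _).2 (List.mem_flatten.2 ⟨s, hs, hw'⟩)
  have hpt : ∀ a, dA.get? a = dB.get? a := by
    rw [hdA, bfs_eq_lvl]
    have hstart : (PySem.Set.add PySem.Set.empty "Paul Erdos" : List String) = ["Paul Erdos"] := rfl
    rw [hstart]
    refine simLoop (artigos.map Prod.snd) G hadj (PySem.List.dedup G.values.flatten) hU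
      (artigos.length + 1) _ _ _ ["Paul Erdos"] (artigos.map Prod.snd) 0
      (fun a => rfl) ?_ ?_ (fun s hs => hs) ?_ ?_ (by simp)
    · intro v hv
      simp only [List.mem_singleton] at hv
      rw [hv]; rfl
    · intro s hsin hs _ _; exact absurd hsin hs
    · intro s _ w _ hc
      have : w = "Paul Erdos" := by
        by_contra hne
        rw [show (PySem.Dict.mk [(("Paul Erdos" : String), (0 : Int))]).contains w
            = false from by
          simp [PySem.Dict.contains, PySem.Dict.get?, show ¬("Paul Erdos" = w) from fun h => hne h.symm]] at hc
        cases hc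
      simp [this]
    · intro _
      have := List.length_filter_le
        (fun u => !(PySem.Dict.mk [(("Paul Erdos" : String), (0 : Int))]).contains u)
        (PySem.List.dedup G.values.flatten)
      omega
  -- both key lists are duplicate-free and have the same members
  have hndA : dA.keys.Nodup := by
    rw [hdA, bfs_eq_lvl]
    exact nodup_keys_lvlLoop G _ _ _ _ (by simp [PySem.Dict.keys])
  have hndB : dB.keys.Nodup := by
    rw [hdB]
    exact nodup_keys_artLoop _ _ _ _ (by simp [PySem.Dict.keys])
  have hmem : ∀ x, x ∈ dA.keys ↔ x ∈ dB.keys := by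
    intro x
    rw [← PySem.Dict.contains_iff_mem_keys, ← PySem.Dict.contains_iff_mem_keys,
      PySem.Dict.contains_eq_isSome_get?, PySem.Dict.contains_eq_isSome_get?, hpt]
  have hperm : dA.keys.Perm dB.keys := (List.perm_ext_iff_of_nodup hndA hndB).2 hmem
  have hgd : ∀ a, dA.getD a 0 = dB.getD a 0 := by
    intro a
    rw [PySem.Dict.getD_eq_get?_getD, PySem.Dict.getD_eq_get?_getD, hpt]
  have hk1 : (fun a => dA.getD a 0) = (fun a => dB.getD a 0) := funext hgd
  have hfil : (fun a => decide (dA.getD a 0 ≤ n)) = (fun a => decide (dB.getD a 0 ≤ n)) := by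
    funext a; rw [hgd]
  rw [hk1, hfil]
  exact sorted2_congr_perm _ _ _ (hperm.filter _)
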